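-- pv_equiv track=rewrite | github.com/LlmaDev/logInteligence | autoReport3.py | _degrees_range_inclusive
-- ===== SOURCE A (Python) =====
-- def _degrees_range_inclusive(start: int, stop: int, direction: str):
--     """Generate degree sequence based on direction"""
--     start = int(start) % 360
--     stop = int(stop) % 360
--     seq = []
--     if direction == "3":  # forward => decreasing
--         cur = start
--         seq.append(cur)
--         while cur != stop:
--             cur = (cur - 1) % 360
--             seq.append(cur)
--             if len(seq) > 720:  # safety
--                 break
--     else:  # reverse => increasing
--         cur = start
--         seq.append(cur)
--         while cur != stop:
--             cur = (cur + 1) % 360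
--             seq.append(cur)
--             if len(seq) > 720:
--                 break
--     return seq
-- ===== SOURCE B (Python) =====
-- def _degrees_range_inclusive(start: int, stop: int, direction: str):
--     """Generate degree sequence based on direction (closed-form step count, no loop cursor)"""
--     s = int(start) % 360
--     t = int(stop) % 360
--     if direction == "3":  # forward => decreasing
--         n = (s - t) % 360
--         return [(s - i) % 360 for i in range(n + 1)]
--     n = (t - s) % 360
--     return [(s + i) % 360 for i in range(n + 1)]
-- ===== Notes on version B (the rewrite author's own statement) =====
-- stated objective: simpler
-- what changed: Replaces the while-loop with a mutated cursor and a 720-step safety break by a precomputed step count n = (start-stop) % 360 (resp. (stop-start) % 360) and a direct index-arithmetic comprehension [(start -/+ i) % 360 for i in range(n+1)].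
import Mathlib
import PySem

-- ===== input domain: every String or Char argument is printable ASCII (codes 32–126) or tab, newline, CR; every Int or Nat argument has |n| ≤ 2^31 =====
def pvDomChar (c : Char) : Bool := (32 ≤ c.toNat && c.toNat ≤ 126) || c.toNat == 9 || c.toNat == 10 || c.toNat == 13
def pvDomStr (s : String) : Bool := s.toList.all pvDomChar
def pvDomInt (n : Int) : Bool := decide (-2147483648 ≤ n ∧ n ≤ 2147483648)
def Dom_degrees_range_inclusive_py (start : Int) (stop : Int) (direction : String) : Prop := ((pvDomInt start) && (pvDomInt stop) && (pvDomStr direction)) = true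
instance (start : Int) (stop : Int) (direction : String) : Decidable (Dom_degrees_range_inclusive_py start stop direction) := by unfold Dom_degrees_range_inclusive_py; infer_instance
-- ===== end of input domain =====

-- B replaces A's cursor-stepping while loop (with its 720-step safety break) by a
-- precomputed step count and a direct index-arithmetic map; objective: simpler.

-- ===== PORT A =====
-- "3" branch loop: while cur != stop: cur = (cur - 1) % 360; seq.append(cur); break if len(seq) > 720
def pvALoopDec (stop : Int) (cur : Int) (seq : List Int) : List Int :=
  if cur = stop then seq
  else if 720 < (seq ++ [PySem.Int.mod (cur - 1) 360]).length then
    seq ++ [PySem.Int.mod (cur - 1) 360]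
  else pvALoopDec stop (PySem.Int.mod (cur - 1) 360) (seq ++ [PySem.Int.mod (cur - 1) 360])
termination_by 721 - seq.length
decreasing_by simp_all; omega

-- else branch loop: while cur != stop: cur = (cur + 1) % 360; seq.append(cur); break if len(seq) > 720
def pvALoopInc (stop : Int) (cur : Int) (seq : List Int) : List Int :=
  if cur = stop then seq
  else if 720 < (seq ++ [PySem.Int.mod (cur + 1) 360]).length then
    seq ++ [PySem.Int.mod (cur + 1) 360]
  else pvALoopInc stop (PySem.Int.mod (cur + 1) 360) (seq ++ [PySem.Int.mod (cur + 1) 360])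
termination_by 721 - seq.length
decreasing_by simp_all; omega

def degrees_range_inclusive_py (start : Int) (stop : Int) (direction : String) : List Int :=
  let start := PySem.Int.mod start 360
  let stop := PySem.Int.mod stop 360
  if direction == "3" then pvALoopDec stop start [start]
  else pvALoopInc stop start [start]

-- ===== PORT B =====
def degrees_range_inclusive_py_alt (start : Int) (stop : Int) (direction : String) : List Int :=
  let s := PySem.Int.mod start 360
  let t := PySem.Int.mod stop 360
  if direction == "3" then
    let n := PySem.Int.mod (s - t) 360
    (List.range (n.toNat + 1)).map (fun (i : Nat) => PySem.Int.mod (s - (i : Int)) 360)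
  else
    let n := PySem.Int.mod (t - s) 360
    (List.range (n.toNat + 1)).map (fun (i : Nat) => PySem.Int.mod (s + (i : Int)) 360)

-- ===== PRECONDITION & SPEC =====
def Spec_degrees_range_inclusive_py (start : Int) (stop : Int) (direction : String) (out : List Int) : Prop := out = degrees_range_inclusive_py_alt start stop direction
instance (start : Int) (stop : Int) (direction : String) (out : List Int) : Decidable (Spec_degrees_range_inclusive_py start stop direction out) := by unfold Spec_degrees_range_inclusive_py; infer_instance

-- ===== CLAIM (what is proved, stated in full; the proofs are below) =====
def Claim_equal_degrees_range_inclusive_py : Prop := ∀ (start : Int) (stop : Int) (direction : String), Dom_degrees_range_inclusive_py start stop direction → Spec_degrees_range_inclusive_py start stop direction (degrees_range_inclusive_py start stop direction)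

-- ===== LEMMAS AND PROOFS =====

theorem pvMod360 (a : Int) : PySem.Int.mod a 360 = a % 360 :=
  PySem.Int.mod_eq_emod_of_pos (by norm_num)

theorem pvMapRangeSucc (n : Nat) (f : Int → Int) :
    (List.range (n + 1)).map (fun (i : Nat) => f (i : Int))
      = f 0 :: (List.range n).map (fun (i : Nat) => f ((i : Int) + 1)) := by
  rw [List.range_succ_eq_map, List.map_cons, List.map_map]
  norm_num

theorem pvALoopDec_eq (d : Nat) (stop cur : Int) (seq : List Int)
    (hc0 : 0 ≤ cur) (hc1 : cur < 360) (hs0 : 0 ≤ stop) (hs1 : stop < 360)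
    (hd : (cur - stop) % 360 = (d : Int)) (hlen : seq.length + d ≤ 720) :
    pvALoopDec stop cur seq
      = seq ++ (List.range d).map (fun (i : Nat) => (cur - ((i : Int) + 1)) % 360) := by
  induction d generalizing cur seq with
  | zero =>
    have : cur = stop := by omega
    rw [pvALoopDec.eq_def]
    simp [this]
  | succ d ih =>
    have hne : cur ≠ stop := by omega
    rw [pvALoopDec.eq_def]
    simp only [hne, if_false, pvMod360]
    have hbr : ¬ 720 < (seq ++ [(cur - 1) % 360]).length := by simp; omega
    simp only [hbr, if_false]
    rw [ih ((cur - 1) % 360) (seq ++ [(cur - 1) % 360]) (by omega) (by omega)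
      (by omega) (by simp; omega)]
    rw [List.append_assoc, pvMapRangeSucc d (fun x => (cur - (x + 1)) % 360)]
    simp only [List.cons_append, List.nil_append]
    congr 1
    congr 1
    apply List.map_congr_left
    intro a ha
    omega

theorem pvALoopInc_eq (d : Nat) (stop cur : Int) (seq : List Int)
    (hc0 : 0 ≤ cur) (hc1 : cur < 360) (hs0 : 0 ≤ stop) (hs1 : stop < 360)
    (hd : (stop - cur) % 360 = (d : Int)) (hlen : seq.length + d ≤ 720) :
    pvALoopInc stop cur seq
      = seq ++ (List.range d).map (fun (i : Nat) => (cur + ((i : Int) + 1)) % 360) := by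
  induction d generalizing cur seq with
  | zero =>
    have : cur = stop := by omega
    rw [pvALoopInc.eq_def]
    simp [this]
  | succ d ih =>
    have hne : cur ≠ stop := by omega
    rw [pvALoopInc.eq_def]
    simp only [hne, if_false, pvMod360]
    have hbr : ¬ 720 < (seq ++ [(cur + 1) % 360]).length := by simp; omega
    simp only [hbr, if_false]
    rw [ih ((cur + 1) % 360) (seq ++ [(cur + 1) % 360]) (by omega) (by omega)
      (by omega) (by simp; omega)]
    rw [List.append_assoc, pvMapRangeSucc d (fun x => (cur + (x + 1)) % 360)]
    simp only [List.cons_append, List.nil_append]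
    congr 1
    congr 1
    apply List.map_congr_left
    intro a ha
    omega

-- ===== VERDICT (by name: the statement is the Claim_ definition above) =====
theorem degrees_range_inclusive_py_spec : Claim_equal_degrees_range_inclusive_py := by
  intro start stop direction _
  unfold Spec_degrees_range_inclusive_py degrees_range_inclusive_py degrees_range_inclusive_py_alt
  simp only [pvMod360]
  set s := start % 360 with hs
  set t := stop % 360 with ht
  have hs0 : 0 ≤ s := Int.emod_nonneg _ (by norm_num)
  have hs1 : s < 360 := Int.emod_lt_of_pos _ (by norm_num)
  have ht0 : 0 ≤ t := Int.emod_nonneg _ (by norm_num)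
  have ht1 : t < 360 := Int.emod_lt_of_pos _ (by norm_num)
  split
  · set d := ((s - t) % 360).toNat with hdn
    have hd : (s - t) % 360 = (d : Int) := by omega
    rw [pvALoopDec_eq d t s [s] hs0 hs1 ht0 ht1 hd (by simp; omega)]
    rw [pvMapRangeSucc d (fun x => (s - x) % 360)]
    simp only [List.singleton_append]
    congr 1
    norm_num
    omega
  · set d := ((t - s) % 360).toNat with hdn
    have hd : (t - s) % 360 = (d : Int) := by omega
    rw [pvALoopInc_eq d t s [s] hs0 hs1 ht0 ht1 hd (by simp; omega)]
    rw [pvMapRangeSucc d (fun x => (s + x) % 360)]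
    simp only [List.singleton_append]
    congr 1
    norm_num
    omega
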